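-- pv_equiv track=rewrite | github.com/KarlHolt/AdventOfCode2023 | day14.py | rocks_roll
-- ===== SOURCE A (Python) =====
-- def rotate(rocks, rotations):
-- 	if rotations == 1:
-- 		new_rocks = [["" for x in range(len(rocks))] for y in range(len(rocks[0]))]
-- 		for i in range(len(rocks)):
-- 			for j in range(len(rocks[i])):
-- 				new_rocks[j][len(rocks)-1-i] = rocks[i][j]
-- 	elif rotations == 2:
-- 		new_rocks = [["" for x in range(len(rocks[0]))] for y in range(len(rocks))]
-- 		for i in range(len(rocks)):
-- 			for j in range(len(rocks[i])):
-- 				new_rocks[i][j] = rocks[len(rocks) - i - 1][len(rocks[i]) - j - 1]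
-- 	elif rotations == 3:
-- 		temp = rotate(rocks, 2)
-- 		return rotate(temp, 1)
-- 	hehe = []
-- 	for y in new_rocks:
-- 		temp = ""
-- 		for x in y:
-- 			temp+=x
-- 		hehe.append(temp)
-- 	return hehe
--
-- def rocks_roll(direction, rocks):
-- 	if direction == "NORTH":
-- 		for j in range(len(rocks[0])):
-- 			place = False
-- 			for i in range(len(rocks)):
-- 				if rocks[i][j] == "." and not place:
-- 					next_place = i
-- 					place = True
-- 				if rocks[i][j] == "O" and place:
-- 					rocks[next_place] = rocks[next_place][:j] + "O" + rocks[next_place][j+1:]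
-- 					rocks[i] = rocks[i][:j] + "." + rocks[i][j+1:]
-- 					next_place = next_place + 1
-- 				if rocks[i][j] == "#":
-- 					place = False
-- 	elif direction == "WEST":
-- 		temp = rotate(rocks, 1)
-- 		hehe = rocks_roll("NORTH", temp)
-- 		return rotate(hehe, 3)
-- 	elif direction == "SOUTH":
-- 		temp = rotate(rocks, 2)
-- 		hehe = rocks_roll("NORTH", temp)
-- 		return rotate(hehe, 2)
-- 	elif direction == "EAST":
-- 		temp = rotate(rocks, 3)
-- 		hehe = rocks_roll("NORTH", temp)
-- 		return rotate(hehe, 1)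
--
-- 	return rocks
-- ===== SOURCE B (Python) =====
-- # B: direct per-lane two-pointer tilt for each direction (no grid rotations, no
-- # per-move string rebuilds). Return-value equivalence only: A mutates `rocks`
-- # in place for direction "NORTH"; B never mutates its argument.
-- def rocks_roll(direction, rocks):
--     def tilt(lane):
--         out = list(lane)
--         np = -1  # index of next open slot; -1 = none since last '#'
--         for i, c in enumerate(lane):
--             if c == '#':
--                 np = -1
--             elif c == '.':
--                 if np < 0:
--                     np = i
--             elif c == 'O':
--                 if np >= 0:
--                     out[np] = 'O'
--                     out[i] = '.'
--                     np += 1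
--         return out
--
--     h = len(rocks)
--     w = len(rocks[0]) if rocks else 0
--     if direction == "NORTH":
--         cols = [tilt([row[j] for row in rocks]) for j in range(w)]
--         return ["".join(cols[j][i] for j in range(w)) for i in range(h)]
--     if direction == "SOUTH":
--         cols = [tilt([row[j] for row in rocks][::-1])[::-1] for j in range(w)]
--         return ["".join(cols[j][i] for j in range(w)) for i in range(h)]
--     if direction == "WEST":
--         return ["".join(tilt(list(row))) for row in rocks]
--     if direction == "EAST":
--         return ["".join(tilt(list(row)[::-1])[::-1]) for row in rocks]
--     return rocks
-- ===== Notes on version B (the rewrite author's own statement) =====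
-- stated objective: alternative
-- what changed: B tilts every lane (row for WEST/EAST, column for NORTH/SOUTH) directly with one two-pointer pass into a char-list copy, instead of A's rotate-grid / tilt-north / rotate-back scheme whose every rock move rebuilds two rows by string slicing. Pre_ excludes empty grids and ragged (non-rectangular) grids for the four compass directions, where A raises IndexError or, when ragged rows extend past row 0, its handling of the leftover columns is an accident of its row slicing, and zero-width rows for WEST/EAST, where A raises.
-- outside the precondition, e.g. on rocks_roll('NORTH', ['..', 'O.X']): A returns ['O.', '..X'], B returns ['O.', '..']
import Mathlib
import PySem

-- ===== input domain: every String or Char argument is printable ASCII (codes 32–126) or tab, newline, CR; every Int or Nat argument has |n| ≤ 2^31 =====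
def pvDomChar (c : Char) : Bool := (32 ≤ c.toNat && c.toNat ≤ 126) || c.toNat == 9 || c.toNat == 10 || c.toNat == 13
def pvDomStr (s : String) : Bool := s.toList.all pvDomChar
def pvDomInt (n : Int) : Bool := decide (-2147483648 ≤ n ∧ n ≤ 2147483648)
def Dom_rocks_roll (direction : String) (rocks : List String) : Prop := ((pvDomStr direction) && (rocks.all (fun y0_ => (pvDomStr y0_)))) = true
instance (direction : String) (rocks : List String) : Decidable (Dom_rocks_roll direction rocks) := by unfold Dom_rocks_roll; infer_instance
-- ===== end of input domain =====

-- B replaces A's rotate/tilt-north/rotate-back scheme (string slicing per rock move) by one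
-- direct two-pointer pass per lane; equivalence is about the RETURN value only (A mutates
-- `rocks` in place for direction "NORTH", B never mutates its argument).

-- ===== PORT A =====
-- A is ported at the List Char level (strings are converted at the boundary; a Python cell
-- string "" / 1-char becomes [] / [c]); the slice rebuild  row[:j] + c + row[j+1:]  is
-- PySem.List.slice on the row's chars, exact on all inputs.

def pvCellA (g : List (List Char)) (i j : Nat) : Char := (g.getD i []).getD j ' '

def pvSetSliceA (row : List Char) (j : Nat) (c : Char) : List Char :=
  PySem.List.slice row none (some (j : Int)) ++ [c] ++ PySem.List.slice row (some ((j : Int) + 1)) none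

def pvSet2A (g : List (List (List Char))) (a b : Nat) (v : List Char) : List (List (List Char)) :=
  g.set a ((g.getD a []).set b v)

def pvJoinRow (y : List (List Char)) : List Char := y.foldl (fun temp x => temp ++ x) []

def rotateA (rocks : List (List Char)) (rotations : Nat) : List (List Char) :=
  match rotations with
  | 1 =>
    let init : List (List (List Char)) :=
      (List.range (rocks.headD []).length).map (fun _ => (List.range rocks.length).map (fun _ => ([] : List Char)))
    let nr := (List.range rocks.length).foldl (fun nr i =>
      (List.range (rocks.getD i []).length).foldl (fun nr j =>
        pvSet2A nr j (rocks.length - 1 - i) [pvCellA rocks i j]) nr) init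
    nr.map pvJoinRow
  | 2 =>
    let init : List (List (List Char)) :=
      (List.range rocks.length).map (fun _ => (List.range (rocks.headD []).length).map (fun _ => ([] : List Char)))
    let nr := (List.range rocks.length).foldl (fun nr i =>
      (List.range (rocks.getD i []).length).foldl (fun nr j =>
        pvSet2A nr i j [pvCellA rocks (rocks.length - i - 1) ((rocks.getD i []).length - j - 1)]) nr) init
    nr.map pvJoinRow
  | 3 => rotateA (rotateA rocks 2) 1
  | _ => []  -- unreachable: rocks_roll only calls rotate with 1, 2, 3

def pvNorthInner (j : Nat) (st : List (List Char) × Bool × Nat) (i : Nat) : List (List Char) × Bool × Nat :=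
  let rocks := st.1
  let place := st.2.1
  let next_place := st.2.2
  -- if rocks[i][j] == "." and not place: next_place = i; place = True
  let pn :=
    if pvCellA rocks i j = '.' ∧ place = false then (true, i) else (place, next_place)
  let place := pn.1
  let next_place := pn.2
  -- if rocks[i][j] == "O" and place: the two slice-rebuild assignments, next_place += 1
  let rn :=
    if pvCellA rocks i j = 'O' ∧ place = true then
      let rocks1 := rocks.set next_place (pvSetSliceA (rocks.getD next_place []) j 'O')
      (rocks1.set i (pvSetSliceA (rocks1.getD i []) j '.'), next_place + 1)
    else (rocks, next_place)
  let rocks := rn.1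
  let next_place := rn.2
  -- if rocks[i][j] == "#": place = False   (read from the updated grid, as Python does)
  let place := if pvCellA rocks i j = '#' then false else place
  (rocks, place, next_place)

def northA (rocks : List (List Char)) : List (List Char) :=
  (List.range (rocks.headD []).length).foldl (fun rocks j =>
    ((List.range rocks.length).foldl (pvNorthInner j) (rocks, false, 0)).1) rocks

def rocksRollA (direction : String) (rocks : List (List Char)) : List (List Char) :=
  if direction = "NORTH" then northA rocks
  else if direction = "WEST" then rotateA (northA (rotateA rocks 1)) 3
  else if direction = "SOUTH" then rotateA (northA (rotateA rocks 2)) 2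
  else if direction = "EAST" then rotateA (northA (rotateA rocks 3)) 1
  else rocks

def rocks_roll (direction : String) (rocks : List String) : List String :=
  (rocksRollA direction (rocks.map String.toList)).map (fun l => String.ofList l)

-- ===== PORT B =====

def pvTiltStep (st : List Char × Int) (ic : Int × Char) : List Char × Int :=
  if ic.2 = '#' then (st.1, -1)
  else if ic.2 = '.' then (st.1, if st.2 < 0 then ic.1 else st.2)
  else if ic.2 = 'O' then
    if 0 ≤ st.2 then ((st.1.set st.2.toNat 'O').set ic.1.toNat '.', st.2 + 1)
    else st
  else st

def pvTilt (lane : List Char) : List Char :=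
  ((PySem.List.enumerate lane 0).foldl pvTiltStep (lane, -1)).1

def pvColB (rows : List (List Char)) (j : Nat) : List Char := rows.map (fun r => r.getD j ' ')

def rocks_roll_alt (direction : String) (rocks : List String) : List String :=
  let rows := rocks.map String.toList
  let h := rocks.length
  let w := (rocks.headD "").toList.length
  if direction = "NORTH" then
    let cols := (List.range w).map (fun j => pvTilt (pvColB rows j))
    (List.range h).map (fun i => String.ofList ((List.range w).map (fun j => (cols.getD j []).getD i ' ')))
  else if direction = "SOUTH" then
    let cols := (List.range w).map (fun j => (pvTilt (pvColB rows j).reverse).reverse)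
    (List.range h).map (fun i => String.ofList ((List.range w).map (fun j => (cols.getD j []).getD i ' ')))
  else if direction = "WEST" then
    rows.map (fun r => String.ofList (pvTilt r))
  else if direction = "EAST" then
    rows.map (fun r => String.ofList ((pvTilt r.reverse).reverse))
  else rocks

-- ===== PRECONDITION & SPEC =====
-- Pre_ excludes, for the four compass directions only: the empty grid and ragged
-- (non-rectangular) grids, on which A raises IndexError or — when ragged rows extend past
-- row 0 — returns with the leftover columns handled as an accident of its row slicing; and
-- zero-width rows for WEST/EAST, on which A raises IndexError.
def Pre_rocks_roll (direction : String) (rocks : List String) : Prop :=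
  (direction = "NORTH" ∨ direction = "WEST" ∨ direction = "SOUTH" ∨ direction = "EAST") →
    (rocks ≠ [] ∧ (∀ s ∈ rocks, PySem.Str.len s = PySem.Str.len (rocks.headD "")) ∧
      ((direction = "WEST" ∨ direction = "EAST") → PySem.Str.len (rocks.headD "") ≠ 0))
instance (direction : String) (rocks : List String) : Decidable (Pre_rocks_roll direction rocks) := by
  unfold Pre_rocks_roll; infer_instance

def pvWitness_rocks_roll : String × List String := ("NORTH", ["O#", ".O"])

def Spec_rocks_roll (direction : String) (rocks : List String) (out : List String) : Prop := out = rocks_roll_alt direction rocks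
instance (direction : String) (rocks : List String) (out : List String) : Decidable (Spec_rocks_roll direction rocks out) := by unfold Spec_rocks_roll; infer_instance

-- ===== CLAIM (what is proved, stated in full; the proofs are below) =====
def Claim_equal_rocks_roll : Prop := ∀ (direction : String) (rocks : List String), Dom_rocks_roll direction rocks → Pre_rocks_roll direction rocks → Spec_rocks_roll direction rocks (rocks_roll direction rocks)

-- ===== LEMMAS AND PROOFS =====

theorem pvGetD_range_map {α : Type} (n k : Nat) (f : Nat → α) (d : α) (h : k < n) :
    ((List.range n).map f).getD k d = f k := by
  simp [List.getD_eq_getElem?_getD, h]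

theorem pvRevMap {α : Type} (n : Nat) (f : Nat → α) :
    ((List.range n).map f).reverse = (List.range n).map (fun i => f (n - 1 - i)) := by
  apply List.ext_getElem
  · simp
  · intro i h1 h2
    simp only [List.getElem_reverse, List.getElem_map, List.getElem_range,
      List.length_map, List.length_range]

theorem pvGetD_set {α : Type} (l : List α) (i j : Nat) (v d : α) :
    (l.set i v).getD j d = if i = j ∧ i < l.length then v else l.getD j d := by
  simp only [List.getD_eq_getElem?_getD, List.getElem?_set]
  by_cases h1 : i = j
  · subst h1
    by_cases h2 : i < l.length
    · simp [h2]
    · simp [h2]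
  · simp [h1]

theorem pvSetSlice_eq_set (row : List Char) (j : Nat) (c : Char) (h : j < row.length) :
    pvSetSliceA row j c = row.set j c := by
  unfold pvSetSliceA
  rw [PySem.List.slice_to _ (by positivity), PySem.List.slice_from _ (by positivity)]
  rw [List.set_eq_take_append_cons_drop]
  simp [h]

theorem pvJoinRow_singletons (n : Nat) (c : Nat → Char) :
    pvJoinRow ((List.range n).map (fun b => [c b])) = (List.range n).map c := by
  induction n with
  | zero => rfl
  | succ n ih =>
    rw [List.range_succ]
    simp only [List.map_append, List.map]
    unfold pvJoinRow
    rw [List.foldl_append]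
    unfold pvJoinRow at ih
    simp [ih]

def pvTiltP (lane : List Char) (k : Nat) : List Char × Int :=
  ((PySem.List.enumerate lane 0).take k).foldl pvTiltStep (lane, -1)

theorem pvTiltP_succ (lane : List Char) (k : Nat) (hk : k < lane.length) :
    pvTiltP lane (k + 1) = pvTiltStep (pvTiltP lane k) ((k : Int), lane.getD k ' ') := by
  unfold pvTiltP
  have h1 : (PySem.List.enumerate lane 0)[k]? = some ((k : Int), lane.getD k ' ') := by
    rw [PySem.List.getElem?_enumerate, List.getElem?_eq_getElem hk]
    simp [List.getD_eq_getElem?_getD, List.getElem?_eq_getElem hk]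
  rw [List.take_add_one, h1]
  simp [List.foldl_append]

theorem pvTiltP_inv (lane : List Char) (k : Nat) (hk : k ≤ lane.length) :
    (pvTiltP lane k).1.length = lane.length ∧
    (∀ m, k ≤ m → (pvTiltP lane k).1.getD m ' ' = lane.getD m ' ') ∧
    (pvTiltP lane k).2 < (k : Int) ∧ (-1 : Int) ≤ (pvTiltP lane k).2 := by
  induction k with
  | zero =>
    have h0 : pvTiltP lane 0 = (lane, -1) := rfl
    rw [h0]
    exact ⟨rfl, fun m _ => rfl, by norm_num, le_refl _⟩
  | succ k ih =>
    obtain ⟨hL, hT, hlt, hge⟩ := ih (by omega)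
    rw [pvTiltP_succ lane k (by omega)]
    set p := pvTiltP lane k with hp
    by_cases c1 : lane[k]?.getD ' ' = '#'
    · have hstep : pvTiltStep p ((k : Int), lane.getD k ' ') = (p.1, -1) := by
        simp [pvTiltStep, List.getD_eq_getElem?_getD, c1]
      rw [hstep]
      exact ⟨hL, fun m hm => hT m (by omega), by push_cast; omega, by norm_num⟩
    · by_cases c2 : lane[k]?.getD ' ' = '.'
      · have hstep : pvTiltStep p ((k : Int), lane.getD k ' ')
            = (p.1, if p.2 < 0 then (k : Int) else p.2) := by
          simp [pvTiltStep, List.getD_eq_getElem?_getD, c1, c2]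
        rw [hstep]
        refine ⟨hL, fun m hm => hT m (by omega), ?_, ?_⟩
        · dsimp only; split_ifs <;> push_cast <;> omega
        · dsimp only; split_ifs <;> omega
      · by_cases c3 : lane[k]?.getD ' ' = 'O'
        · by_cases c4 : p.2 < 0
          · have hstep : pvTiltStep p ((k : Int), lane.getD k ' ') = (p.1, p.2) := by
              simp [pvTiltStep, List.getD_eq_getElem?_getD, c1, c2, c3, not_le.mpr c4]
            rw [hstep]
            exact ⟨hL, fun m hm => hT m (by omega), by push_cast; omega, hge⟩
          · have c4' : (0 : Int) ≤ p.2 := by omega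
            have hstep : pvTiltStep p ((k : Int), lane.getD k ' ')
                = ((p.1.set p.2.toNat 'O').set k '.', p.2 + 1) := by
              simp [pvTiltStep, List.getD_eq_getElem?_getD, c1, c2, c3, c4']
            rw [hstep]
            refine ⟨by simp [hL], fun m hm => ?_, by push_cast; omega, by omega⟩
            dsimp only
            rw [pvGetD_set, if_neg (by rintro ⟨h, -⟩; omega),
                pvGetD_set, if_neg (by rintro ⟨h, -⟩; omega)]
            exact hT m (by omega)
        · have hstep : pvTiltStep p ((k : Int), lane.getD k ' ') = p := by
            simp [pvTiltStep, List.getD_eq_getElem?_getD, c1, c2, c3]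
          rw [hstep]
          exact ⟨hL, fun m hm => hT m (by omega), by push_cast; omega, hge⟩

theorem pvTilt_eq_tiltP (lane : List Char) : pvTilt lane = (pvTiltP lane lane.length).1 := by
  unfold pvTilt pvTiltP
  rw [show (PySem.List.enumerate lane 0).take lane.length = PySem.List.enumerate lane 0 from by
    rw [← PySem.List.length_enumerate lane 0]; exact List.take_length]

theorem pvTilt_length (lane : List Char) : (pvTilt lane).length = lane.length := by
  rw [pvTilt_eq_tiltP]
  exact (pvTiltP_inv lane lane.length le_rfl).1

theorem pvSet_getD_self (l : List Char) (j : Nat) (d : Char) :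
    l.set j (l.getD j d) = l := by
  apply List.ext_getElem (by simp)
  intro i h1 h2
  rw [List.getElem_set]
  split_ifs with h3
  · subst h3; rw [List.getD_eq_getElem _ _ h2]
  · rfl

def pvSetColG (g : List (List Char)) (j : Nat) (out : List Char) : List (List Char) :=
  g.mapIdx (fun i r => r.set j (out.getD i ' '))

theorem pvSetColG_length (g : List (List Char)) (j : Nat) (out : List Char) :
    (pvSetColG g j out).length = g.length := by
  simp [pvSetColG]

theorem pvGetElem?_setColG (g : List (List Char)) (j : Nat) (out : List Char) (a : Nat) :
    (pvSetColG g j out)[a]? = g[a]?.map (fun r => r.set j (out.getD a ' ')) := by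
  simp [pvSetColG, List.getElem?_mapIdx]

theorem pvGetD_setColG (g : List (List Char)) (j : Nat) (out : List Char) (i : Nat) (hi : i < g.length) :
    (pvSetColG g j out).getD i [] = (g.getD i []).set j (out.getD i ' ') := by
  simp only [List.getD_eq_getElem?_getD, pvGetElem?_setColG, List.getElem?_eq_getElem hi]
  rfl

theorem pvSetColG_self (g : List (List Char)) (j : Nat) :
    pvSetColG g j (pvColB g j) = g := by
  apply List.ext_getElem?
  intro a
  rw [pvGetElem?_setColG]
  by_cases h2 : a < g.length
  · rw [List.getElem?_eq_getElem h2]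
    have h4 : (pvColB g j).getD a ' ' = g[a].getD j ' ' := by
      rw [List.getD_eq_getElem _ _ (by simpa [pvColB] using h2)]
      simp [pvColB]
    rw [Option.map_some, h4, ← List.getD_eq_getElem g ([] : List Char) h2]
    rw [List.getD_eq_getElem _ _ h2, pvSet_getD_self]
  · rw [List.getElem?_eq_none (by omega), Option.map_none]

theorem pvSetColG_set (g : List (List Char)) (j : Nat) (out : List Char) (i : Nat) (c : Char)
    (hi : i < g.length) (hio : i < out.length) :
    (pvSetColG g j out).set i ((g.getD i []).set j c) = pvSetColG g j (out.set i c) := by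
  apply List.ext_getElem?
  intro a
  rw [List.getElem?_set, pvGetElem?_setColG, pvGetElem?_setColG]
  by_cases h3 : i = a
  · subst h3
    rw [if_pos rfl, if_pos (by simpa [pvSetColG_length] using hi)]
    rw [List.getElem?_eq_getElem hi, Option.map_some]
    rw [pvGetD_set, if_pos ⟨rfl, hio⟩, List.getD_eq_getElem _ _ hi]
  · rw [if_neg h3]
    congr 1
    funext r
    rw [pvGetD_set, if_neg (by tauto)]

theorem pvCell_setColG {w : Nat} (g : List (List Char)) (j : Nat) (out : List Char) (i : Nat)
    (hRect : ∀ r ∈ g, r.length = w) (hi : i < g.length) (hj : j < w) :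
    pvCellA (pvSetColG g j out) i j = out.getD i ' ' := by
  unfold pvCellA
  rw [pvGetD_setColG _ _ _ _ hi, pvGetD_set]
  have hlen : j < (g.getD i []).length := by
    rw [List.getD_eq_getElem _ _ hi, hRect _ (List.getElem_mem hi)]; exact hj
  rw [if_pos ⟨rfl, hlen⟩]

theorem pvNorth_inner_aux {w : Nat} (g : List (List Char)) (j : Nat)
    (hRect : ∀ r ∈ g, r.length = w) (hj : j < w) (k : Nat) (hk : k ≤ g.length) :
    ((List.range k).foldl (pvNorthInner j) (g, false, 0)).1
        = pvSetColG g j (pvTiltP (pvColB g j) k).1 ∧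
    ((List.range k).foldl (pvNorthInner j) (g, false, 0)).2.1
        = decide (0 ≤ (pvTiltP (pvColB g j) k).2) ∧
    (((List.range k).foldl (pvNorthInner j) (g, false, 0)).2.1 = true →
      (((List.range k).foldl (pvNorthInner j) (g, false, 0)).2.2 : Int)
        = (pvTiltP (pvColB g j) k).2) := by
  have hlaneLen : (pvColB g j).length = g.length := by simp [pvColB]
  induction k with
  | zero =>
    rw [List.range_zero, List.foldl_nil]
    have h0 : pvTiltP (pvColB g j) 0 = (pvColB g j, -1) := rfl
    rw [h0]
    exact ⟨(pvSetColG_self g j).symm, by norm_num, by intro h; simp at h⟩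
  | succ k ih =>
    obtain ⟨i1, i2, i3⟩ := ih (by omega)
    obtain ⟨hlen, htail, hblt, hbge⟩ := pvTiltP_inv (pvColB g j) k (by omega)
    rw [List.range_succ, List.foldl_append, pvTiltP_succ _ k (by omega)]
    simp only [List.foldl_cons, List.foldl_nil]
    set st := (List.range k).foldl (pvNorthInner j) (g, false, 0) with hst
    set out := (pvTiltP (pvColB g j) k).1 with hout
    set nb := (pvTiltP (pvColB g j) k).2 with hnb
    set cK := (pvColB g j).getD k ' ' with hcK
    have hcell : pvCellA st.1 k j = cK := by
      rw [i1, pvCell_setColG g j out k hRect (by omega) hj]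
      exact htail k le_rfl
    by_cases c1 : cK = '.'
    · by_cases c2 : st.2.1 = false
      · have hnb0 : nb < 0 := by
          rw [c2] at i2; have := of_decide_eq_false i2.symm; omega
        have hstep : pvNorthInner j st k = (st.1, true, k) := by
          simp [pvNorthInner, hcell, c1, c2]
        have htp : pvTiltStep (out, nb) ((k : Int), cK) = (out, (k : Int)) := by
          simp [pvTiltStep, c1, hnb0]
        rw [hstep, htp]
        exact ⟨i1, by simp, by intro _; rfl⟩
      · have c2' : st.2.1 = true := by revert c2; cases st.2.1 <;> simp
        have hnb0 : (0 : Int) ≤ nb := by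
          rw [c2'] at i2; exact of_decide_eq_true i2.symm
        have hstep : pvNorthInner j st k = (st.1, st.2.1, st.2.2) := by
          simp [pvNorthInner, hcell, c1, c2']
        have htp : pvTiltStep (out, nb) ((k : Int), cK) = (out, nb) := by
          simp [pvTiltStep, c1, not_lt.mpr hnb0]
        rw [hstep, htp]
        exact ⟨i1, i2, fun h => i3 h⟩
    · by_cases c3 : cK = 'O'
      · by_cases c2 : st.2.1 = true
        · have hnb0 : (0 : Int) ≤ nb := by
            rw [c2] at i2; exact of_decide_eq_true i2.symm
          have hnpv : (st.2.2 : Int) = nb := i3 c2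
          have hnpg : st.2.2 < g.length := by omega
          have hnpo : st.2.2 < out.length := by omega
          have hrowlen : ∀ i, i < g.length → j < (g.getD i []).length := by
            intro i hi
            rw [List.getD_eq_getElem _ _ hi, hRect _ (List.getElem_mem hi)]; exact hj
          have hg1 : st.1.set st.2.2 (pvSetSliceA (st.1.getD st.2.2 []) j 'O')
              = pvSetColG g j (out.set st.2.2 'O') := by
            rw [i1, pvGetD_setColG _ _ _ _ hnpg,
                pvSetSlice_eq_set _ _ _ (by rw [List.length_set]; exact hrowlen _ hnpg),
                List.set_set]
            exact pvSetColG_set g j out st.2.2 'O' hnpg hnpo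
          have hko : k < (out.set st.2.2 'O').length := by rw [List.length_set]; omega
          have hg2 : (pvSetColG g j (out.set st.2.2 'O')).set k
                (pvSetSliceA ((pvSetColG g j (out.set st.2.2 'O')).getD k []) j '.')
              = pvSetColG g j ((out.set st.2.2 'O').set k '.') := by
            rw [pvGetD_setColG _ _ _ _ (by omega),
                pvSetSlice_eq_set _ _ _ (by rw [List.length_set]; exact hrowlen _ (by omega)),
                List.set_set]
            exact pvSetColG_set g j (out.set st.2.2 'O') k '.' (by omega) hko
          have hcell2 : pvCellA (pvSetColG g j ((out.set st.2.2 'O').set k '.')) k j = '.' := by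
            rw [pvCell_setColG g j _ k hRect (by omega) hj, pvGetD_set, if_pos ⟨rfl, hko⟩]
          have hstep : pvNorthInner j st k
              = (pvSetColG g j ((out.set st.2.2 'O').set k '.'), true, st.2.2 + 1) := by
            have hg1' := hg1
            have hg2' := hg2
            simp only [List.getD_eq_getElem?_getD] at hg1' hg2'
            simp [pvNorthInner, hcell, c3, c2, hg1', hg2', hcell2]
          have htp : pvTiltStep (out, nb) ((k : Int), cK)
              = ((out.set nb.toNat 'O').set k '.', nb + 1) := by
            simp [pvTiltStep, c1, c3, hnb0]
          rw [hstep, htp]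
          have hnbt : nb.toNat = st.2.2 := by omega
          rw [hnbt]
          exact ⟨rfl, by simp; omega, by intro _; push_cast; omega⟩
        · have c2' : st.2.1 = false := by revert c2; cases st.2.1 <;> simp
          have hnb0 : nb < 0 := by
            rw [c2'] at i2; have := of_decide_eq_false i2.symm; omega
          have hstep : pvNorthInner j st k = (st.1, st.2.1, st.2.2) := by
            simp [pvNorthInner, hcell, c3, c2']
          have htp : pvTiltStep (out, nb) ((k : Int), cK) = (out, nb) := by
            simp [pvTiltStep, c1, c3, not_le.mpr hnb0]
          rw [hstep, htp]
          exact ⟨i1, i2, fun h => i3 h⟩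
      · by_cases c4 : cK = '#'
        · have hstep : pvNorthInner j st k = (st.1, false, st.2.2) := by
            simp [pvNorthInner, hcell, c4]
          have htp : pvTiltStep (out, nb) ((k : Int), cK) = (out, -1) := by
            simp [pvTiltStep, c4]
          rw [hstep, htp]
          exact ⟨i1, by norm_num, by intro h; simp at h⟩
        · have hstep : pvNorthInner j st k = (st.1, st.2.1, st.2.2) := by
            simp [pvNorthInner, hcell, c1, c3, c4]
          have htp : pvTiltStep (out, nb) ((k : Int), cK) = (out, nb) := by
            simp [pvTiltStep, c1, c3, c4]
          rw [hstep, htp]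
          exact ⟨i1, i2, fun h => i3 h⟩

theorem pvNorth_inner {w : Nat} (g : List (List Char)) (j : Nat)
    (hRect : ∀ r ∈ g, r.length = w) (hj : j < w) :
    ((List.range g.length).foldl (pvNorthInner j) (g, false, 0)).1
      = pvSetColG g j (pvTilt (pvColB g j)) := by
  have h := (pvNorth_inner_aux g j hRect hj g.length le_rfl).1
  rw [h, pvTilt_eq_tiltP]
  congr 2
  simp [pvColB]

theorem pvSet_getD_self' {α : Type} (l : List α) (j : Nat) (d : α) :
    l.set j (l.getD j d) = l := by
  apply List.ext_getElem (by simp)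
  intro i h1 h2
  rw [List.getElem_set]
  split_ifs with h3
  · subst h3; rw [List.getD_eq_getElem _ _ h2]
  · rfl

theorem pvRow_eq {w : Nat} (g : List (List Char)) (hRect : ∀ r ∈ g, r.length = w)
    (i : Nat) (hi : i < g.length) :
    g.getD i [] = (List.range w).map (fun b => pvCellA g i b) := by
  have hlen : (g.getD i []).length = w := by
    rw [List.getD_eq_getElem _ _ hi]; exact hRect _ (List.getElem_mem hi)
  apply List.ext_getElem (by simpa using hlen)
  intro b h1 h2
  simp only [List.getElem_map, List.getElem_range]
  unfold pvCellA
  exact ((List.getD_eq_getElem _ _ (by omega : b < (g.getD i []).length))).symm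

theorem pvColB_eq_range (g : List (List Char)) (j : Nat) :
    pvColB g j = (List.range g.length).map (fun i => pvCellA g i j) := by
  apply List.ext_getElem (by simp [pvColB])
  intro i h1 h2
  have hi : i < g.length := by simpa [pvColB] using h1
  simp only [pvColB, List.getElem_map, List.getElem_range]
  unfold pvCellA
  congr 1
  exact (List.getD_eq_getElem _ _ hi).symm

theorem pvCell_range_map (n m : Nat) (f : Nat → Nat → Char) (i j : Nat) (hi : i < n) (hj : j < m) :
    pvCellA ((List.range n).map (fun a => (List.range m).map (f a))) i j = f i j := by
  unfold pvCellA
  rw [pvGetD_range_map _ _ _ _ hi, pvGetD_range_map _ _ _ _ hj]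

theorem pvColB_range_map (n m : Nat) (f : Nat → Nat → Char) (j : Nat) (hj : j < m) :
    pvColB ((List.range n).map (fun a => (List.range m).map (f a))) j
      = (List.range n).map (fun i => f i j) := by
  unfold pvColB
  rw [List.map_map]
  exact List.map_congr_left (fun a _ => pvGetD_range_map m j (f a) ' ' hj)

theorem pvNorthA_eq {w : Nat} (g : List (List Char)) (h0 : g ≠ [])
    (hRect : ∀ r ∈ g, r.length = w) :
    northA g = (List.range g.length).map (fun i =>
      (List.range w).map (fun j => (pvTilt (pvColB g j)).getD i ' ')) := by
  have hhead : g.headD [] ∈ g := by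
    cases g with
    | nil => exact absurd rfl h0
    | cons a t => exact List.mem_cons_self
  have hw : (g.headD []).length = w := hRect _ hhead
  have haux : ∀ t, t ≤ w →
      (List.range t).foldl (fun rocks j =>
          ((List.range rocks.length).foldl (pvNorthInner j) (rocks, false, 0)).1) g
        = (List.range g.length).map (fun i =>
            (List.range w).map (fun j =>
              if j < t then (pvTilt (pvColB g j)).getD i ' ' else pvCellA g i j)) := by
    intro t ht
    induction t with
    | zero =>
      rw [List.range_zero, List.foldl_nil]
      apply List.ext_getElem?
      intro i
      simp only [List.getElem?_map, Nat.not_lt_zero, if_false]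
      by_cases hi : i < g.length
      · rw [List.getElem?_eq_getElem hi, List.getElem?_range hi]
        simp only [Option.map_some, Option.some.injEq]
        have h := pvRow_eq g hRect i hi
        rw [List.getD_eq_getElem _ _ hi] at h
        exact h
      · rw [List.getElem?_eq_none (by omega : g.length ≤ i),
            List.getElem?_eq_none (by simp; omega : (List.range g.length).length ≤ i)]
        rfl
    | succ t ihh =>
      have ih := ihh (by omega)
      rw [List.range_succ, List.foldl_append, ih, List.foldl_cons, List.foldl_nil]
      have hmixRect : ∀ r ∈ (List.range g.length).map (fun i =>
            (List.range w).map (fun j =>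
              if j < t then (pvTilt (pvColB g j)).getD i ' ' else pvCellA g i j)), r.length = w := by
        intro r hr
        obtain ⟨i, _, rfl⟩ := List.mem_map.mp hr
        simp
      have hcolEq : pvColB ((List.range g.length).map (fun i =>
            (List.range w).map (fun j =>
              if j < t then (pvTilt (pvColB g j)).getD i ' ' else pvCellA g i j))) t = pvColB g t := by
        rw [pvColB_range_map _ _ _ _ (by omega), pvColB_eq_range]
        exact List.map_congr_left (fun i _ => by simp)
      have hNI := pvNorth_inner _ t hmixRect (by omega : t < w)
      simp only [List.length_map, List.length_range] at hNI ⊢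
      rw [hNI, hcolEq]
      apply List.ext_getElem?
      intro a
      rw [pvGetElem?_setColG]
      simp only [List.getElem?_map]
      by_cases ha : a < g.length
      · rw [List.getElem?_range ha]
        simp only [Option.map_some, Option.some.injEq]
        apply List.ext_getElem?
        intro b
        simp only [List.getElem?_set, List.getElem?_map, List.length_map, List.length_range]
        by_cases hb : b < w
        · by_cases h3 : t = b
          · subst h3
            rw [if_pos rfl, if_pos (by omega : t < w), List.getElem?_range hb, Option.map_some]
            rw [if_pos (by omega : t < t + 1)]
          · rw [if_neg h3, List.getElem?_range hb, Option.map_some, Option.map_some]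
            exact congrArg some (if_congr ⟨fun h => by omega, fun h => by omega⟩ rfl rfl)
        · have h3 : t ≠ b := by omega
          rw [if_neg h3, List.getElem?_eq_none (by simp; omega : (List.range w).length ≤ b)]
          rfl
      · rw [List.getElem?_eq_none (by simp; omega : (List.range g.length).length ≤ a)]
        rfl
  have hfin := haux w le_rfl
  unfold northA
  rw [hw, hfin]
  apply List.map_congr_left
  intro i _
  apply List.map_congr_left
  intro j hj
  rw [if_pos (List.mem_range.mp hj)]

theorem pvMapIdx_range_map {α β : Type} (n : Nat) (rowf : Nat → α) (f : Nat → α → β) :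
    ((List.range n).map rowf).mapIdx f = (List.range n).map (fun a => f a (rowf a)) := by
  apply List.ext_getElem?
  intro x
  simp only [List.getElem?_mapIdx, List.getElem?_map]
  by_cases hx : x < n
  · rw [List.getElem?_range hx]; rfl
  · rw [List.getElem?_eq_none (by simp; omega : (List.range n).length ≤ x)]; rfl

theorem pvFoldSet2_rows (nr : List (List (List Char))) (b : Nat) (v : Nat → List Char) (s : Nat) :
    (List.range s).foldl (fun acc j => pvSet2A acc j b (v j)) nr
      = nr.mapIdx (fun a row => if a < s then row.set b (v a) else row) := by
  induction s with
  | zero =>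
    rw [List.range_zero, List.foldl_nil]
    apply List.ext_getElem?
    intro x
    simp [List.getElem?_mapIdx]
  | succ s ih =>
    rw [List.range_succ, List.foldl_append, ih, List.foldl_cons, List.foldl_nil]
    unfold pvSet2A
    apply List.ext_getElem?
    intro x
    simp only [List.getElem?_set, List.getElem?_mapIdx, List.length_mapIdx]
    by_cases h1 : s = x
    · subst h1
      by_cases h2 : s < nr.length
      · have hrow : (nr.mapIdx fun a row => if a < s then row.set b (v a) else row).getD s []
            = nr[s] := by
          rw [List.getD_eq_getElem _ _ (by simpa using h2)]
          simp [List.getElem_mapIdx]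
        simp [h2, hrow, List.getElem?_eq_getElem h2, Nat.lt_succ_self]
      · simp [h2, List.getElem?_eq_none (by omega : nr.length ≤ s)]
    · simp only [if_neg h1]
      cases hnx : nr[x]? with
      | none => rfl
      | some row =>
        simp only [Option.map_some, Option.some.injEq]
        by_cases hx : x < s
        · rw [if_pos hx, if_pos (by omega)]
        · rw [if_neg hx, if_neg (by omega)]

theorem pvFoldSet2_cols (nr : List (List (List Char))) (i : Nat) (v : Nat → List Char) (s : Nat)
    (hi : i < nr.length) (hs : s ≤ (nr.getD i []).length) :
    (List.range s).foldl (fun acc j => pvSet2A acc i j (v j)) nr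
      = nr.set i ((List.range s).map v ++ (nr.getD i []).drop s) := by
  induction s with
  | zero =>
    rw [List.range_zero, List.foldl_nil, List.map_nil, List.nil_append, List.drop_zero,
      pvSet_getD_self']
  | succ s ih =>
    rw [List.range_succ, List.foldl_append, ih (by omega), List.foldl_cons, List.foldl_nil]
    unfold pvSet2A
    rw [List.set_set, pvGetD_set, if_pos ⟨rfl, hi⟩]
    congr 1
    rw [List.set_append]
    have hlm : ((List.range s).map v).length = s := by simp
    rw [if_neg (by omega), hlm, Nat.sub_self,
        List.drop_eq_getElem_cons (by omega : s < (nr.getD i []).length), List.set_cons_zero]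
    simp [List.range_succ]


theorem pvRot1_eq {w : Nat} (g : List (List Char)) (h0 : g ≠ [])
    (hRect : ∀ r ∈ g, r.length = w) :
    rotateA g 1 = (List.range w).map (fun a =>
      (List.range g.length).map (fun b => pvCellA g (g.length - 1 - b) a)) := by
  have hhead : g.headD [] ∈ g := by
    cases g with
    | nil => exact absurd rfl h0
    | cons a t => exact List.mem_cons_self
  have hw : (g.headD []).length = w := hRect _ hhead
  have hrowlen : ∀ i, i < g.length → (g.getD i []).length = w := by
    intro i hi
    rw [List.getD_eq_getElem _ _ hi]; exact hRect _ (List.getElem_mem hi)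
  have hbody : rotateA g 1 =
      ((List.range g.length).foldl (fun nr i =>
        (List.range (g.getD i []).length).foldl (fun nr j =>
          pvSet2A nr j (g.length - 1 - i) [pvCellA g i j]) nr)
        ((List.range (g.headD []).length).map (fun _ =>
          (List.range g.length).map (fun _ => ([] : List Char))))).map pvJoinRow := by
    simp only [rotateA]
  have haux : ∀ t, t ≤ g.length →
      (List.range t).foldl (fun nr i =>
        (List.range (g.getD i []).length).foldl (fun nr j =>
          pvSet2A nr j (g.length - 1 - i) [pvCellA g i j]) nr)
        ((List.range w).map (fun _ => (List.range g.length).map (fun _ => ([] : List Char))))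
      = (List.range w).map (fun a => (List.range g.length).map (fun b =>
          if g.length - t ≤ b then [pvCellA g (g.length - 1 - b) a] else ([] : List Char))) := by
    intro t ht
    induction t with
    | zero =>
      rw [List.range_zero, List.foldl_nil]
      apply List.map_congr_left
      intro a _
      apply List.map_congr_left
      intro b hb
      rw [if_neg (by have := List.mem_range.mp hb; omega)]
    | succ t ihh =>
      have ih := ihh (by omega)
      rw [List.range_succ, List.foldl_append, ih, List.foldl_cons, List.foldl_nil,
        hrowlen t (by omega),
        pvFoldSet2_rows _ (g.length - 1 - t) (fun j => [pvCellA g t j]) w,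
        pvMapIdx_range_map]
      apply List.map_congr_left
      intro a ha
      rw [if_pos (List.mem_range.mp ha)]
      apply List.ext_getElem?
      intro b
      simp only [List.getElem?_set, List.getElem?_map, List.length_map, List.length_range]
      by_cases hb : b < g.length
      · by_cases h3 : g.length - 1 - t = b
        · rw [if_pos h3, if_pos (by omega), List.getElem?_range hb, Option.map_some]
          rw [if_pos (by omega)]
          rw [show g.length - 1 - b = t by omega]
        · rw [if_neg h3, List.getElem?_range hb, Option.map_some, Option.map_some]
          exact congrArg some (by
            by_cases hcb : g.length - t ≤ b
            · rw [if_pos hcb, if_pos (by omega)]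
            · rw [if_neg hcb, if_neg (by omega)])
      · rw [if_neg (by omega),
          List.getElem?_eq_none (by simp; omega : (List.range g.length).length ≤ b)]
        rfl
  rw [hbody, hw, haux g.length le_rfl, List.map_map]
  apply List.map_congr_left
  intro a _
  show pvJoinRow ((List.range g.length).map (fun b =>
      if g.length - g.length ≤ b then [pvCellA g (g.length - 1 - b) a] else [])) = _
  rw [List.map_congr_left (fun b _ => by
      rw [if_pos (by omega)] :
    ∀ b ∈ List.range g.length, (if g.length - g.length ≤ b then [pvCellA g (g.length - 1 - b) a]
      else []) = [pvCellA g (g.length - 1 - b) a])]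
  exact pvJoinRow_singletons g.length (fun b => pvCellA g (g.length - 1 - b) a)

theorem pvRot2_eq {w : Nat} (g : List (List Char)) (h0 : g ≠ [])
    (hRect : ∀ r ∈ g, r.length = w) :
    rotateA g 2 = (List.range g.length).map (fun a =>
      (List.range w).map (fun b => pvCellA g (g.length - 1 - a) (w - 1 - b))) := by
  have hhead : g.headD [] ∈ g := by
    cases g with
    | nil => exact absurd rfl h0
    | cons a t => exact List.mem_cons_self
  have hw : (g.headD []).length = w := hRect _ hhead
  have hrowlen : ∀ i, i < g.length → (g.getD i []).length = w := by
    intro i hi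
    rw [List.getD_eq_getElem _ _ hi]; exact hRect _ (List.getElem_mem hi)
  have hbody : rotateA g 2 =
      ((List.range g.length).foldl (fun nr i =>
        (List.range (g.getD i []).length).foldl (fun nr j =>
          pvSet2A nr i j [pvCellA g (g.length - i - 1) ((g.getD i []).length - j - 1)]) nr)
        ((List.range g.length).map (fun _ =>
          (List.range (g.headD []).length).map (fun _ => ([] : List Char))))).map pvJoinRow := by
    simp only [rotateA]
  have haux : ∀ t, t ≤ g.length →
      (List.range t).foldl (fun nr i =>
        (List.range (g.getD i []).length).foldl (fun nr j =>
          pvSet2A nr i j [pvCellA g (g.length - i - 1) ((g.getD i []).length - j - 1)]) nr)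
        ((List.range g.length).map (fun _ => (List.range w).map (fun _ => ([] : List Char))))
      = (List.range g.length).map (fun a =>
          if a < t then (List.range w).map (fun b =>
            [pvCellA g (g.length - 1 - a) (w - 1 - b)])
          else (List.range w).map (fun _ => ([] : List Char))) := by
    intro t ht
    induction t with
    | zero =>
      rw [List.range_zero, List.foldl_nil]
      apply List.map_congr_left
      intro a _
      rw [if_neg (by omega)]
    | succ t ihh =>
      have ih := ihh (by omega)
      rw [List.range_succ, List.foldl_append, ih, List.foldl_cons, List.foldl_nil,
        hrowlen t (by omega)]
      have hmixlen : ((List.range g.length).map (fun a =>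
          if a < t then (List.range w).map (fun b =>
            [pvCellA g (g.length - 1 - a) (w - 1 - b)])
          else (List.range w).map (fun _ => ([] : List Char)))).length = g.length := by simp
      have hrowt : ((List.range g.length).map (fun a =>
          if a < t then (List.range w).map (fun b =>
            [pvCellA g (g.length - 1 - a) (w - 1 - b)])
          else (List.range w).map (fun _ => ([] : List Char)))).getD t []
          = (List.range w).map (fun _ => ([] : List Char)) := by
        rw [pvGetD_range_map _ _ _ _ (by omega : t < g.length), if_neg (by omega)]
      rw [pvFoldSet2_cols _ t (fun j => [pvCellA g (g.length - t - 1) (w - j - 1)]) w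
          (by omega) (by rw [hrowt]; simp)]
      rw [hrowt]
      rw [show ((List.range w).map (fun _ => ([] : List Char))).drop w
          = [] from List.drop_of_length_le (by simp), List.append_nil]
      apply List.ext_getElem?
      intro x
      simp only [List.getElem?_set, List.getElem?_map, List.length_map, List.length_range]
      by_cases hx : x < g.length
      · by_cases h3 : t = x
        · subst h3
          rw [if_pos rfl, if_pos (by omega), List.getElem?_range hx, Option.map_some]
          rw [if_pos (by omega : t < t + 1)]
          exact congrArg some (List.map_congr_left (fun b _ => by
            rw [show g.length - t - 1 = g.length - 1 - t by omega,
                show w - b - 1 = w - 1 - b by omega]))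
        · rw [if_neg h3, List.getElem?_range hx, Option.map_some, Option.map_some]
          exact congrArg some (by
            by_cases hcb : x < t
            · rw [if_pos hcb, if_pos (by omega)]
            · rw [if_neg hcb, if_neg (by omega)])
      · rw [if_neg (by omega),
          List.getElem?_eq_none (by simp; omega : (List.range g.length).length ≤ x)]
        rfl
  rw [hbody, hw, haux g.length le_rfl, List.map_map]
  apply List.map_congr_left
  intro a ha
  show pvJoinRow (if a < g.length then _ else _) = _
  rw [if_pos (List.mem_range.mp ha)]
  exact pvJoinRow_singletons w (fun b => pvCellA g (g.length - 1 - a) (w - 1 - b))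

theorem pvCanon_ne (n m : Nat) (f : Nat → Nat → Char) (hn : n ≠ 0) :
    ((List.range n).map (fun a => (List.range m).map (f a))) ≠ [] := by
  intro h
  have := congrArg List.length h
  simp at this
  omega

theorem pvCanon_rect (n m : Nat) (f : Nat → Nat → Char) :
    ∀ r ∈ ((List.range n).map (fun a => (List.range m).map (f a))), r.length = m := by
  intro r hr
  obtain ⟨i, _, rfl⟩ := List.mem_map.mp hr
  simp

theorem pvGetD_reverse (l : List Char) (a : Nat) (ha : a < l.length) :
    l.reverse.getD a ' ' = l.getD (l.length - 1 - a) ' ' := by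
  rw [List.getD_eq_getElem _ _ (by simpa using ha), List.getD_eq_getElem _ _ (by omega)]
  exact List.getElem_reverse _

theorem pvWest_dir {w : Nat} (g : List (List Char)) (h0 : g ≠ []) (hw : w ≠ 0)
    (hRect : ∀ r ∈ g, r.length = w) :
    rotateA (northA (rotateA g 1)) 3 = (List.range g.length).map (fun a =>
      (List.range w).map (fun b => (pvTilt (g.getD a [])).getD b ' ')) := by
  have hg0 : 0 < g.length := by
    cases g with
    | nil => exact absurd rfl h0
    | cons x t => simp
  -- stage 1: first rotation
  have s1 : rotateA g 1 = (List.range w).map (fun a =>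
      (List.range g.length).map (fun b => pvCellA g (g.length - 1 - b) a)) :=
    pvRot1_eq g h0 hRect
  -- stage 2: tilt north
  have s2 := pvNorthA_eq (w := g.length)
    ((List.range w).map (fun a => (List.range g.length).map (fun b => pvCellA g (g.length - 1 - b) a)))
    (pvCanon_ne _ _ _ hw) (pvCanon_rect _ _ _)
  simp only [List.length_map, List.length_range] at s2
  have s2' : northA ((List.range w).map (fun a =>
        (List.range g.length).map (fun b => pvCellA g (g.length - 1 - b) a)))
      = (List.range w).map (fun i => (List.range g.length).map (fun j =>
          (pvTilt (g.getD (g.length - 1 - j) [])).getD i ' ')) := by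
    rw [s2]
    apply List.map_congr_left; intro i _
    apply List.map_congr_left; intro j hj
    rw [pvColB_range_map w g.length (fun a b => pvCellA g (g.length - 1 - b) a) j
        (List.mem_range.mp hj),
      ← pvRow_eq g hRect (g.length - 1 - j) (by omega)]
  -- stage 3: rotation by 2
  have s3 := pvRot2_eq (w := g.length)
    ((List.range w).map (fun i => (List.range g.length).map (fun j =>
      (pvTilt (g.getD (g.length - 1 - j) [])).getD i ' ')))
    (pvCanon_ne _ _ _ hw) (pvCanon_rect _ _ _)
  simp only [List.length_map, List.length_range] at s3
  have s3' : rotateA ((List.range w).map (fun i => (List.range g.length).map (fun j =>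
        (pvTilt (g.getD (g.length - 1 - j) [])).getD i ' '))) 2
      = (List.range w).map (fun a => (List.range g.length).map (fun b =>
          (pvTilt (g.getD b [])).getD (w - 1 - a) ' ')) := by
    rw [s3]
    apply List.map_congr_left; intro a ha
    apply List.map_congr_left; intro b hb
    have ha' := List.mem_range.mp ha
    have hb' := List.mem_range.mp hb
    rw [pvCell_range_map w g.length
        (fun i j => (pvTilt (g.getD (g.length - 1 - j) [])).getD i ' ')
        (w - 1 - a) (g.length - 1 - b) (by omega) (by omega),
      show g.length - 1 - (g.length - 1 - b) = b by omega]
  -- stage 4: final rotation by 1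
  have s4 := pvRot1_eq (w := g.length)
    ((List.range w).map (fun a => (List.range g.length).map (fun b =>
      (pvTilt (g.getD b [])).getD (w - 1 - a) ' ')))
    (pvCanon_ne _ _ _ hw) (pvCanon_rect _ _ _)
  simp only [List.length_map, List.length_range] at s4
  have hrot3 : ∀ x : List (List Char), rotateA x 3 = rotateA (rotateA x 2) 1 := by
    intro x; simp only [rotateA]
  rw [s1, s2', hrot3, s3', s4]
  apply List.map_congr_left; intro a ha
  apply List.map_congr_left; intro b hb
  have ha' := List.mem_range.mp ha
  have hb' := List.mem_range.mp hb
  rw [pvCell_range_map w g.length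
      (fun x y => (pvTilt (g.getD y [])).getD (w - 1 - x) ' ')
      (w - 1 - b) a (by omega) (by omega),
    show w - 1 - (w - 1 - b) = b by omega]

theorem pvSouth_dir {w : Nat} (g : List (List Char)) (h0 : g ≠ [])
    (hRect : ∀ r ∈ g, r.length = w) :
    rotateA (northA (rotateA g 2)) 2 = (List.range g.length).map (fun a =>
      (List.range w).map (fun b =>
        ((pvTilt (pvColB g b).reverse).reverse).getD a ' ')) := by
  have hg0 : 0 < g.length := by
    cases g with
    | nil => exact absurd rfl h0
    | cons x t => simp
  have hgne : g.length ≠ 0 := by omega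
  have s1 : rotateA g 2 = (List.range g.length).map (fun a =>
      (List.range w).map (fun b => pvCellA g (g.length - 1 - a) (w - 1 - b))) :=
    pvRot2_eq g h0 hRect
  have s2 := pvNorthA_eq (w := w)
    ((List.range g.length).map (fun a => (List.range w).map (fun b =>
      pvCellA g (g.length - 1 - a) (w - 1 - b))))
    (pvCanon_ne _ _ _ hgne) (pvCanon_rect _ _ _)
  simp only [List.length_map, List.length_range] at s2
  have s2' : northA ((List.range g.length).map (fun a => (List.range w).map (fun b =>
        pvCellA g (g.length - 1 - a) (w - 1 - b))))
      = (List.range g.length).map (fun i => (List.range w).map (fun j =>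
          (pvTilt (pvColB g (w - 1 - j)).reverse).getD i ' ')) := by
    rw [s2]
    apply List.map_congr_left; intro i _
    apply List.map_congr_left; intro j hj
    rw [pvColB_range_map g.length w
        (fun a b => pvCellA g (g.length - 1 - a) (w - 1 - b)) j (List.mem_range.mp hj),
      pvColB_eq_range g (w - 1 - j), pvRevMap]
  have s3 := pvRot2_eq (w := w)
    ((List.range g.length).map (fun i => (List.range w).map (fun j =>
      (pvTilt (pvColB g (w - 1 - j)).reverse).getD i ' ')))
    (pvCanon_ne _ _ _ hgne) (pvCanon_rect _ _ _)
  simp only [List.length_map, List.length_range] at s3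
  rw [s1, s2', s3]
  apply List.map_congr_left; intro a ha
  apply List.map_congr_left; intro b hb
  have ha' := List.mem_range.mp ha
  have hb' := List.mem_range.mp hb
  rw [pvCell_range_map g.length w
      (fun i j => (pvTilt (pvColB g (w - 1 - j)).reverse).getD i ' ')
      (g.length - 1 - a) (w - 1 - b) (by omega) (by omega),
    show w - 1 - (w - 1 - b) = b by omega]
  have hl : (pvTilt (pvColB g b).reverse).length = g.length := by
    rw [pvTilt_length, List.length_reverse]; simp [pvColB]
  rw [pvGetD_reverse _ a (by omega : a < (pvTilt (pvColB g b).reverse).length), hl]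

theorem pvEast_dir {w : Nat} (g : List (List Char)) (h0 : g ≠ []) (hw : w ≠ 0)
    (hRect : ∀ r ∈ g, r.length = w) :
    rotateA (northA (rotateA g 3)) 1 = (List.range g.length).map (fun a =>
      (List.range w).map (fun b => ((pvTilt (g.getD a []).reverse).reverse).getD b ' ')) := by
  have hg0 : 0 < g.length := by
    cases g with
    | nil => exact absurd rfl h0
    | cons x t => simp
  have hgne : g.length ≠ 0 := by omega
  have hrot3 : ∀ x : List (List Char), rotateA x 3 = rotateA (rotateA x 2) 1 := by
    intro x; simp only [rotateA]
  have s1 : rotateA g 2 = (List.range g.length).map (fun a =>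
      (List.range w).map (fun b => pvCellA g (g.length - 1 - a) (w - 1 - b))) :=
    pvRot2_eq g h0 hRect
  have s1b := pvRot1_eq (w := w)
    ((List.range g.length).map (fun a => (List.range w).map (fun b =>
      pvCellA g (g.length - 1 - a) (w - 1 - b))))
    (pvCanon_ne _ _ _ hgne) (pvCanon_rect _ _ _)
  simp only [List.length_map, List.length_range] at s1b
  have s1b' : rotateA ((List.range g.length).map (fun a => (List.range w).map (fun b =>
        pvCellA g (g.length - 1 - a) (w - 1 - b)))) 1
      = (List.range w).map (fun a => (List.range g.length).map (fun b =>
          pvCellA g b (w - 1 - a))) := by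
    rw [s1b]
    apply List.map_congr_left; intro a ha
    apply List.map_congr_left; intro b hb
    have ha' := List.mem_range.mp ha
    have hb' := List.mem_range.mp hb
    rw [pvCell_range_map g.length w
        (fun x y => pvCellA g (g.length - 1 - x) (w - 1 - y))
        (g.length - 1 - b) a (by omega) (by omega),
      show g.length - 1 - (g.length - 1 - b) = b by omega]
  have s2 := pvNorthA_eq (w := g.length)
    ((List.range w).map (fun a => (List.range g.length).map (fun b =>
      pvCellA g b (w - 1 - a))))
    (pvCanon_ne _ _ _ hw) (pvCanon_rect _ _ _)
  simp only [List.length_map, List.length_range] at s2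
  have s2' : northA ((List.range w).map (fun a => (List.range g.length).map (fun b =>
        pvCellA g b (w - 1 - a))))
      = (List.range w).map (fun i => (List.range g.length).map (fun j =>
          (pvTilt (g.getD j []).reverse).getD i ' ')) := by
    rw [s2]
    apply List.map_congr_left; intro i _
    apply List.map_congr_left; intro j hj
    rw [pvColB_range_map w g.length
        (fun a b => pvCellA g b (w - 1 - a)) j (List.mem_range.mp hj),
      pvRow_eq g hRect j (List.mem_range.mp hj), pvRevMap]
  have s3 := pvRot1_eq (w := g.length)
    ((List.range w).map (fun i => (List.range g.length).map (fun j =>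
      (pvTilt (g.getD j []).reverse).getD i ' ')))
    (pvCanon_ne _ _ _ hw) (pvCanon_rect _ _ _)
  simp only [List.length_map, List.length_range] at s3
  rw [hrot3, s1, s1b', s2', s3]
  apply List.map_congr_left; intro a ha
  apply List.map_congr_left; intro b hb
  have ha' := List.mem_range.mp ha
  have hb' := List.mem_range.mp hb
  rw [pvCell_range_map w g.length
      (fun i j => (pvTilt (g.getD j []).reverse).getD i ' ')
      (w - 1 - b) a (by omega) (by omega)]
  have hl : (pvTilt (g.getD a []).reverse).length = w := by
    rw [pvTilt_length, List.length_reverse, List.getD_eq_getElem _ _ ha']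
    exact hRect _ (List.getElem_mem ha')
  rw [pvGetD_reverse _ b (by omega : b < (pvTilt (g.getD a []).reverse).length), hl]

theorem pvGetD_enum (l : List Char) (w : Nat) (hl : l.length = w) :
    (List.range w).map (fun b => l.getD b ' ') = l := by
  apply List.ext_getElem (by simp [hl])
  intro b h1 h2
  simp only [List.getElem_map, List.getElem_range]
  exact List.getD_eq_getElem _ _ (by omega)

theorem pvMain (direction : String) (rocks : List String)
    (hP : Pre_rocks_roll direction rocks) :
    rocks_roll direction rocks = rocks_roll_alt direction rocks := by
  unfold rocks_roll rocks_roll_alt rocksRollA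
  set g := rocks.map String.toList with hg
  set w := (rocks.headD "").toList.length with hwdef
  have hlen : g.length = rocks.length := by simp [hg]
  have hhead : (rocks.headD "").toList = g.headD [] := by cases rocks <;> rfl
  have hfacts : (direction = "NORTH" ∨ direction = "WEST" ∨ direction = "SOUTH" ∨
      direction = "EAST") → g ≠ [] ∧ (∀ r ∈ g, r.length = w) := by
    intro hd
    obtain ⟨h0, hrectS, -⟩ := hP hd
    constructor
    · simpa [hg] using h0
    · intro r hr
      obtain ⟨s, hs, rfl⟩ := List.mem_map.mp hr
      have := hrectS s hs
      simp only [PySem.Str.len_eq] at this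
      rw [hwdef]
      exact_mod_cast this
  by_cases hN : direction = "NORTH"
  · subst hN
    obtain ⟨hgne, hrect⟩ := hfacts (Or.inl rfl)
    simp only [String.reduceEq, reduceIte]
    rw [pvNorthA_eq (w := w) g hgne hrect, List.map_map, hlen]
    apply List.map_congr_left; intro i _
    show String.ofList _ = _
    congr 1
    apply List.map_congr_left; intro j hj
    rw [pvGetD_range_map _ _ _ _ (List.mem_range.mp hj)]
  · by_cases hW : direction = "WEST"
    · subst hW
      obtain ⟨hgne, hrect⟩ := hfacts (Or.inr (Or.inl rfl))
      have hwne : w ≠ 0 := by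
        have := (hP (Or.inr (Or.inl rfl))).2.2 (Or.inl rfl)
        simp only [PySem.Str.len_eq] at this
        rw [hwdef]
        exact_mod_cast this
      simp only [String.reduceEq, reduceIte]
      rw [pvWest_dir g hgne hwne hrect]
      apply List.ext_getElem?
      intro x
      simp only [List.getElem?_map]
      by_cases hx : x < g.length
      · rw [List.getElem?_range hx, List.getElem?_eq_getElem hx]
        simp only [Option.map_some, Option.some.injEq]
        congr 1
        rw [← List.getD_eq_getElem _ ([] : List Char) hx]
        apply pvGetD_enum
        rw [pvTilt_length, List.getD_eq_getElem _ _ hx]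
        exact hrect _ (List.getElem_mem hx)
      · rw [List.getElem?_eq_none (by simp; omega : (List.range g.length).length ≤ x),
          List.getElem?_eq_none (by omega : g.length ≤ x)]
        rfl
    · by_cases hS : direction = "SOUTH"
      · subst hS
        obtain ⟨hgne, hrect⟩ := hfacts (Or.inr (Or.inr (Or.inl rfl)))
        simp only [String.reduceEq, reduceIte]
        rw [pvSouth_dir g hgne hrect, hlen, List.map_map]
        apply List.map_congr_left; intro i _
        show String.ofList _ = _
        congr 1
        apply List.map_congr_left; intro j hj
        rw [pvGetD_range_map _ _ _ _ (List.mem_range.mp hj)]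
      · by_cases hE : direction = "EAST"
        · subst hE
          obtain ⟨hgne, hrect⟩ := hfacts (Or.inr (Or.inr (Or.inr rfl)))
          have hwne : w ≠ 0 := by
            have := (hP (Or.inr (Or.inr (Or.inr rfl)))).2.2 (Or.inr rfl)
            simp only [PySem.Str.len_eq] at this
            rw [hwdef]
            exact_mod_cast this
          simp only [String.reduceEq, reduceIte]
          rw [pvEast_dir g hgne hwne hrect]
          apply List.ext_getElem?
          intro x
          simp only [List.getElem?_map]
          by_cases hx : x < g.length
          · rw [List.getElem?_range hx, List.getElem?_eq_getElem hx]
            simp only [Option.map_some, Option.some.injEq]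
            congr 1
            rw [← List.getD_eq_getElem _ ([] : List Char) hx]
            apply pvGetD_enum
            rw [List.length_reverse, pvTilt_length, List.length_reverse,
              List.getD_eq_getElem _ _ hx]
            exact hrect _ (List.getElem_mem hx)
          · rw [List.getElem?_eq_none (by simp; omega : (List.range g.length).length ≤ x),
              List.getElem?_eq_none (by omega : g.length ≤ x)]
            rfl
        · rw [if_neg hN, if_neg hW, if_neg hS, if_neg hE, if_neg hN, if_neg hS,
            if_neg hW, if_neg hE]
          rw [hg, List.map_map,
            List.map_congr_left (fun s _ =>
              (by exact String.ofList_toList : ((fun l => String.ofList l) ∘ String.toList) s = id s)),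
            List.map_id]

-- ===== VERDICT (by name: the statement is the Claim_ definition above) =====
theorem rocks_roll_spec : Claim_equal_rocks_roll := by
  intro direction rocks _hD hP
  unfold Spec_rocks_roll
  exact pvMain direction rocks hP
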